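-- pv_equiv track=rewrite | github.com/RossFW/botc | botc_elo.py | _standardize_role
-- ===== SOURCE A (Python) =====
-- def _standardize_role(role_part: str) -> str:
--     """
--     Convert a raw role string to a standardized form.
--     Handles underscores and capitalization so that 'witch' and 'Witch' are treated the same.
--     """
--     if not role_part:
--         return ""
--     # split on underscores, capitalize first letter of each segment
--     segments = role_part.split("_")
--     standardized_segments: list[str] = []
--     for seg in segments:
--         if seg:
--             # Preserve apostrophes and other punctuation, but standardize case
--             standardized_segments.append(seg[0].upper() + seg[1:].lower())
--         else:
--             standardized_segments.append(seg)
--     return "_".join(standardized_segments)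
-- ===== SOURCE B (Python) =====
-- def _standardize_role(role_part: str) -> str:
--     """Single left-to-right character scan: capitalize at segment starts,
--     lowercase elsewhere, underscores preserved."""
--     out = []
--     at_start = True
--     for c in role_part:
--         if c == "_":
--             out.append(c)
--             at_start = True
--         else:
--             out.append(c.upper() if at_start else c.lower())
--             at_start = False
--     return "".join(out)
-- ===== Notes on version B (the rewrite author's own statement) =====
-- stated objective: alternative
-- what changed: Replaces split-on-underscore / per-segment capitalize / join with a single character scan carrying an at-segment-start flag; no segment list is built.
import Mathlib
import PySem

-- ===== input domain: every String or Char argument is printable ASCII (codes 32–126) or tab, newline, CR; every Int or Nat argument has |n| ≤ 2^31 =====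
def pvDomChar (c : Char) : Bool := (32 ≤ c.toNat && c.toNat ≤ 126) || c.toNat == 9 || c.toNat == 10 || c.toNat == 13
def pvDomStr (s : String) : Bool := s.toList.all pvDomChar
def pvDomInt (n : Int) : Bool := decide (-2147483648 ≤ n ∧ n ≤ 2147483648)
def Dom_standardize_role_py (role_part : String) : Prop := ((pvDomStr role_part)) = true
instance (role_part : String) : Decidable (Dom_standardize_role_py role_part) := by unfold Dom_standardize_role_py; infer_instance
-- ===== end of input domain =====

-- B replaces split/capitalize/join with a single character scan carrying an at-segment-start flag (alternative decomposition, same cost).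

-- ===== PORT A =====
-- seg[0].upper() + seg[1:].lower() for a nonempty segment; empty segments kept as-is
def pvCapSeg (seg : List Char) : List Char :=
  match seg with
  | [] => seg
  | c :: rest => PySem.Chars.upperChar c :: PySem.Chars.lower rest

def standardize_role_py (role_part : String) : String :=
  if role_part.toList = [] then ""
  else
    let segments := PySem.Chars.splitOn role_part.toList ['_']
    let standardized := segments.foldl (fun acc seg => acc ++ [pvCapSeg seg]) []
    String.ofList (PySem.Chars.join ['_'] standardized)

-- ===== PORT B =====
def standardize_role_py_alt (role_part : String) : String :=
  let st := role_part.toList.foldl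
    (fun (p : List Char × Bool) c =>
      if c = '_' then (p.1 ++ [c], true)
      else (p.1 ++ [if p.2 then PySem.Chars.upperChar c else PySem.Chars.lowerChar c], false))
    ([], true)
  String.ofList st.1

-- ===== PRECONDITION & SPEC =====
def Spec_standardize_role_py (role_part : String) (out : String) : Prop := out = standardize_role_py_alt role_part
instance (role_part : String) (out : String) : Decidable (Spec_standardize_role_py role_part out) := by unfold Spec_standardize_role_py; infer_instance

-- ===== CLAIM (what is proved, stated in full; the proofs are below) =====
def Claim_equal_standardize_role_py : Prop := ∀ (role_part : String), Dom_standardize_role_py role_part → Spec_standardize_role_py role_part (standardize_role_py role_part)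

-- ===== LEMMAS AND PROOFS =====

-- structural reference splitter: what splitOn on a single '_' computes
def mySplit : List Char → List (List Char)
  | [] => [[]]
  | c :: cs => if c = '_' then [] :: mySplit cs else (mySplit cs).modifyHead (c :: ·)

theorem mySplit_ne_nil (cs : List Char) : mySplit cs ≠ [] := by
  induction cs with
  | nil => simp [mySplit]
  | cons c cs ih =>
    simp only [mySplit]
    split
    · simp
    · cases hm : mySplit cs with
      | nil => exact absurd hm ih
      | cons h t => simp

theorem splitOn_go_eq (fuel : Nat) (l cur : List Char) (acc : List (List Char))
    (h : l.length < fuel) :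
    PySem.Chars.splitOn.go ['_'] fuel l cur acc
      = acc.reverse ++ (mySplit l).modifyHead (cur.reverse ++ ·) := by
  induction fuel generalizing l cur acc with
  | zero => omega
  | succ fuel ih =>
    cases l with
    | nil => simp [PySem.Chars.splitOn.go, mySplit, List.modifyHead]
    | cons c rest =>
      rw [PySem.Chars.splitOn.go]
      by_cases hc : c = '_'
      · subst hc
        have hpre : List.isPrefixOf ['_'] ('_' :: rest) = true := by
          simp [List.isPrefixOf]
        simp only [hpre, if_pos, List.length_cons] at *
        simp only [List.length_nil, Nat.zero_add, List.drop_succ_cons, List.drop_zero]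
        rw [ih rest [] (cur.reverse :: acc) (by omega)]
        simp only [mySplit, List.modifyHead, List.reverse_cons, List.reverse_nil,
          List.nil_append, List.append_assoc, List.cons_append]
        cases mySplit rest <;> simp
      · have hpre : List.isPrefixOf ['_'] (c :: rest) = false := by
          simp [List.isPrefixOf]
          exact fun h => absurd h.symm hc
        simp only [hpre, Bool.false_eq_true, if_false]
        rw [ih rest (c :: cur) acc (by simpa using Nat.lt_of_succ_lt_succ h)]
        have : mySplit (c :: rest) = (mySplit rest).modifyHead (c :: ·) := by
          simp [mySplit, hc]
        rw [this]
        cases hm : mySplit rest with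
        | nil => exact absurd hm (mySplit_ne_nil rest)
        | cons hd tl => simp [List.modifyHead]

theorem splitOn_eq_mySplit (cs : List Char) :
    PySem.Chars.splitOn cs ['_'] = mySplit cs := by
  rw [PySem.Chars.splitOn, splitOn_go_eq cs.length.succ cs [] [] (Nat.lt_succ_self _)]
  cases hm : mySplit cs with
  | nil => exact absurd hm (mySplit_ne_nil cs)
  | cons hd tl => simp [List.modifyHead]

-- the A-side for-loop with append is a map
theorem foldl_append_map (segs : List (List Char)) (init : List (List Char)) :
    segs.foldl (fun acc seg => acc ++ [pvCapSeg seg]) init = init ++ segs.map pvCapSeg := by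
  induction segs generalizing init with
  | nil => simp
  | cons s ss ih => simp [List.foldl_cons, ih]

-- structural form of B's scan
def pvScan : List Char → Bool → List Char
  | [], _ => []
  | c :: cs, b =>
    if c = '_' then '_' :: pvScan cs true
    else (if b then PySem.Chars.upperChar c else PySem.Chars.lowerChar c) :: pvScan cs false

theorem foldl_scan (cs : List Char) (out : List Char) (b : Bool) :
    (cs.foldl
      (fun (p : List Char × Bool) c =>
        if c = '_' then (p.1 ++ [c], true)
        else (p.1 ++ [if p.2 then PySem.Chars.upperChar c else PySem.Chars.lowerChar c], false))
      (out, b)).1 = out ++ pvScan cs b := by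
  induction cs generalizing out b with
  | nil => simp [pvScan]
  | cons c cs ih =>
    simp only [List.foldl_cons, pvScan]
    by_cases hc : c = '_'
    · subst hc; simp [ih]
    · simp [hc, ih]

theorem join_cons_head (sep : List Char) (x : Char) (xs : List Char) (rest : List (List Char)) :
    PySem.Chars.join sep ((x :: xs) :: rest) = x :: PySem.Chars.join sep (xs :: rest) := by
  cases rest <;> simp [PySem.Chars.join, List.intercalate]

theorem join_nil_cons (rest : List (List Char)) (hr : rest ≠ []) :
    PySem.Chars.join ['_'] ([] :: rest) = '_' :: PySem.Chars.join ['_'] rest := by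
  cases rest with
  | nil => exact absurd rfl hr
  | cons h t => simp [PySem.Chars.join, List.intercalate]

-- what the head of the segment list contributes depending on the flag
def pvHeadMap (b : Bool) (l : List (List Char)) : List (List Char) :=
  match l with
  | [] => []
  | h :: t => (if b then pvCapSeg h else PySem.Chars.lower h) :: t.map pvCapSeg

theorem scan_eq_join (cs : List Char) (b : Bool) :
    pvScan cs b = PySem.Chars.join ['_'] (pvHeadMap b (mySplit cs)) := by
  induction cs generalizing b with
  | nil => cases b <;> simp [pvScan, mySplit, pvHeadMap, pvCapSeg, PySem.Chars.lower, PySem.Chars.join, List.intercalate]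
  | cons c cs ih =>
    by_cases hc : c = '_'
    · subst hc
      cases hm : mySplit cs with
      | nil => exact absurd hm (mySplit_ne_nil cs)
      | cons h t =>
        have h1 : mySplit ('_' :: cs) = [] :: h :: t := by simp [mySplit, hm]
        rw [pvScan, if_pos rfl, h1]
        have h2 : pvHeadMap b ([] :: h :: t) = [] :: (h :: t).map pvCapSeg := by
          cases b <;> simp [pvHeadMap, pvCapSeg, PySem.Chars.lower]
        rw [h2, join_nil_cons _ (by simp), ih true, hm]
        simp [pvHeadMap]
    · cases hm : mySplit cs with
      | nil => exact absurd hm (mySplit_ne_nil cs)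
      | cons h t =>
        have h1 : mySplit (c :: cs) = (c :: h) :: t := by simp [mySplit, hc, hm, List.modifyHead]
        rw [pvScan, if_neg hc, h1, ih false, hm]
        have h2 : pvHeadMap b ((c :: h) :: t)
            = ((if b then PySem.Chars.upperChar c else PySem.Chars.lowerChar c) :: PySem.Chars.lower h) :: t.map pvCapSeg := by
          cases b <;> simp [pvHeadMap, pvCapSeg, PySem.Chars.lower]
        rw [h2, join_cons_head]
        simp [pvHeadMap]

-- ===== VERDICT (by name: the statement is the Claim_ definition above) =====
theorem standardize_role_py_spec : Claim_equal_standardize_role_py := by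
  intro role_part _
  unfold Spec_standardize_role_py standardize_role_py standardize_role_py_alt
  simp only []
  rw [foldl_scan, scan_eq_join]
  by_cases he : role_part.toList = []
  · simp [he, mySplit, pvHeadMap, pvCapSeg, PySem.Chars.join, List.intercalate]
  · rw [if_neg he, splitOn_eq_mySplit, foldl_append_map]
    cases hm : mySplit role_part.toList with
    | nil => exact absurd hm (mySplit_ne_nil _)
    | cons h t => simp [pvHeadMap]
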